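-- pv_equiv track=rewrite | github.com/ttforsd/leetcode | 1601. Maximum Number of Achievable Transfer Requests.py | l2graph
-- ===== SOURCE A (Python) =====
-- def l2graph(requests):
--     graph = {}
--     for i in range(len(requests)):
--         if i not in graph:
--             graph[i] = []
--         for j in range(len(requests)):
--             if requests[i][1] == requests[j][0]:
--                 graph[i].append(j)
--     return graph
-- ===== SOURCE B (Python) =====
-- def l2graph(requests):
--     # One pass to index request indices by their start value, then a direct
--     # lookup per request instead of A's quadratic inner scan.
--     n = len(requests)
--     starts = {}
--     for j in range(n):
--         starts.setdefault(requests[j][0], []).append(j)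
--     return {i: list(starts.get(requests[i][1], [])) for i in range(n)}
-- ===== Notes on version B (the rewrite author's own statement) =====
-- stated objective: faster
-- what changed: A compares every pair (i,j) in nested loops; B makes one pass building a dict from start value to the list of request indices and then answers each request with a single lookup.
import Mathlib
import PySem

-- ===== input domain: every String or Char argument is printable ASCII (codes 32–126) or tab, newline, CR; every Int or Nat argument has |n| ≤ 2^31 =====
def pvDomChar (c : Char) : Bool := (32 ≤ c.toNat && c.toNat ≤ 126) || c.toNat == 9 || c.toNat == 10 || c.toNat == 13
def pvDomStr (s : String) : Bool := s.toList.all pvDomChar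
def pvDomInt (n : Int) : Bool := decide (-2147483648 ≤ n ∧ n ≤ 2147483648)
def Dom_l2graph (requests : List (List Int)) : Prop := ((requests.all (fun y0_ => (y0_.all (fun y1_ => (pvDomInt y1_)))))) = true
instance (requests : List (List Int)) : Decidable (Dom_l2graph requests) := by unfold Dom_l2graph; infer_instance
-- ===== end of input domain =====

-- B replaces A's nested quadratic scan by a single pass that indexes request indices by start value, then one dict lookup per request.

-- ===== PORT A =====
def l2graph (requests : List (List Int)) : List (Int × List Int) :=
  let graph := (PySem.List.pyRange 0 (requests.length : Int) 1).foldl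
    (fun g i =>
      let g := if g.contains i then g else g.insert i []
      (PySem.List.pyRange 0 (requests.length : Int) 1).foldl
        (fun g j =>
          if PySem.List.pyGetD (PySem.List.pyGetD requests i []) 1 0 ==
             PySem.List.pyGetD (PySem.List.pyGetD requests j []) 0 0
          then g.modify i [] (fun v => v ++ [j]) else g) g)
    PySem.Dict.empty
  graph.items

-- ===== PORT B =====
def l2graph_alt (requests : List (List Int)) : List (Int × List Int) :=
  let starts := (PySem.List.pyRange 0 (requests.length : Int) 1).foldl
    (fun d j => d.modify (PySem.List.pyGetD (PySem.List.pyGetD requests j []) 0 0) [] (fun w => w ++ [j]))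
    PySem.Dict.empty
  (PySem.List.pyRange 0 (requests.length : Int) 1).map
    (fun i => (i, starts.getD (PySem.List.pyGetD (PySem.List.pyGetD requests i []) 1 0) []))

-- ===== PRECONDITION & SPEC =====
-- Pre_: Python A indexes requests[i][1] and requests[j][0] for every i and j, so it raises
-- IndexError unless every request list has at least two entries; Pre_ excludes exactly those inputs.
def Pre_l2graph (requests : List (List Int)) : Prop := ∀ r ∈ requests, 2 ≤ r.length
instance (requests : List (List Int)) : Decidable (Pre_l2graph requests) := by unfold Pre_l2graph; infer_instance

def pvWitness_l2graph : List (List Int) := [[0, 1], [1, 0], [1, 2]]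

def Spec_l2graph (requests : List (List Int)) (out : List (Int × List Int)) : Prop := out = l2graph_alt requests
instance (requests : List (List Int)) (out : List (Int × List Int)) : Decidable (Spec_l2graph requests out) := by unfold Spec_l2graph; infer_instance

-- ===== CLAIM (what is proved, stated in full; the proofs are below) =====
def Claim_equal_l2graph : Prop := ∀ (requests : List (List Int)), Dom_l2graph requests → Pre_l2graph requests → Spec_l2graph requests (l2graph requests)

-- ===== LEMMAS AND PROOFS =====

-- modify at key i on a dict whose last entry is (i, acc), i not among the earlier keys: append there
theorem pv_modify_last (pre : List (Int × List Int)) (i : Int) (acc : List Int) (j : Int)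
    (h : ∀ p ∈ pre, p.1 ≠ i) :
    (PySem.Dict.mk (pre ++ [(i, acc)])).modify i [] (fun v => v ++ [j]) =
      PySem.Dict.mk (pre ++ [(i, acc ++ [j])]) := by
  have hc : (PySem.Dict.mk (pre ++ [(i, acc)])).contains i = true := by
    simp [PySem.Dict.contains]
  have hg : (PySem.Dict.mk (pre ++ [(i, acc)])).get? i = some acc := by
    simp [PySem.Dict.get?, List.find?_append]
    rw [List.find?_eq_none.mpr (by intro p hp; simpa using h p hp)]
    simp
  have hmap : ∀ (l : List (Int × List Int)), (∀ p ∈ l, p.1 ≠ i) →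
      List.map (fun p => if p.1 = i then (i, acc ++ [j]) else p) l = l := by
    intro l hl
    induction l with
    | nil => simp
    | cons q qs ih => simp_all
  simp [PySem.Dict.modify, PySem.Dict.insert, hc, PySem.Dict.getD, hg]
  exact hmap pre h

-- A's inner loop appends exactly the indices passing the test to the last entry
theorem pv_inner (js : List Int) (c : Int → Bool) (i : Int) (pre : List (Int × List Int))
    (acc : List Int) (h : ∀ p ∈ pre, p.1 ≠ i) :
    (js.foldl (fun g j => if c j then g.modify i [] (fun v => v ++ [j]) else g)
      (PySem.Dict.mk (pre ++ [(i, acc)]))) =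
      PySem.Dict.mk (pre ++ [(i, acc ++ js.filter c)]) := by
  induction js generalizing acc with
  | nil => simp
  | cons j js ih =>
    by_cases hc : c j
    · simp only [List.foldl_cons, hc, if_pos, pv_modify_last pre i acc j h, ih]
      simp [hc]
    · simp only [List.foldl_cons, hc]
      rw [if_neg (by simp), ih]
      simp [hc]

-- A's outer loop builds one entry per index 0..k-1, in order
theorem pv_outer (requests : List (List Int)) (k : Nat) :
    ((PySem.List.pyRange 0 (k : Int) 1).foldl
      (fun g i =>
        let g := if g.contains i then g else g.insert i []
        (PySem.List.pyRange 0 (requests.length : Int) 1).foldl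
          (fun g j =>
            if PySem.List.pyGetD (PySem.List.pyGetD requests i []) 1 0 ==
               PySem.List.pyGetD (PySem.List.pyGetD requests j []) 0 0
            then g.modify i [] (fun v => v ++ [j]) else g) g)
      PySem.Dict.empty) =
      PySem.Dict.mk ((PySem.List.pyRange 0 (k : Int) 1).map
        (fun i => (i, (PySem.List.pyRange 0 (requests.length : Int) 1).filter
          (fun j => PySem.List.pyGetD (PySem.List.pyGetD requests i []) 1 0 ==
                    PySem.List.pyGetD (PySem.List.pyGetD requests j []) 0 0)))) := by
  induction k with
  | zero => simp [PySem.List.pyRange_one_eq_nil, PySem.Dict.empty]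
  | succ k ih =>
    have hsplit : PySem.List.pyRange 0 ((k+1 : Nat) : Int) 1 =
        PySem.List.pyRange 0 (k : Int) 1 ++ [(k : Int)] := by
      push_cast
      exact PySem.List.pyRange_one_succ_right (by positivity)
    rw [hsplit, List.foldl_append, ih, List.map_append]
    simp only [List.foldl_cons, List.foldl_nil, List.map_cons, List.map_nil]
    have hfresh : ∀ p ∈ (PySem.List.pyRange 0 (k : Int) 1).map
        (fun i => (i, (PySem.List.pyRange 0 (requests.length : Int) 1).filter
          (fun j => PySem.List.pyGetD (PySem.List.pyGetD requests i []) 1 0 ==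
                    PySem.List.pyGetD (PySem.List.pyGetD requests j []) 0 0))),
        p.1 ≠ (k : Int) := by
      intro p hp
      obtain ⟨i, hi, rfl⟩ := List.mem_map.mp hp
      have := (PySem.List.mem_pyRange_one).mp hi
      omega
    have hcont : (PySem.Dict.mk ((PySem.List.pyRange 0 (k : Int) 1).map
        (fun i => (i, (PySem.List.pyRange 0 (requests.length : Int) 1).filter
          (fun j => PySem.List.pyGetD (PySem.List.pyGetD requests i []) 1 0 ==
                    PySem.List.pyGetD (PySem.List.pyGetD requests j []) 0 0))))).contains (k : Int) = false := by
      simp only [PySem.Dict.contains, List.any_eq_false]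
      intro p hp
      simpa using hfresh p hp
    simp only [hcont, Bool.false_eq_true, if_false, PySem.Dict.insert]
    rw [pv_inner _ _ _ _ _ hfresh]
    simp

-- B's index dict looked up at v yields exactly the indices whose start value is v
theorem pv_starts (requests : List (List Int)) (v : Int) :
    ((PySem.List.pyRange 0 (requests.length : Int) 1).foldl
      (fun d j => d.modify (PySem.List.pyGetD (PySem.List.pyGetD requests j []) 0 0) [] (fun w => w ++ [j]))
      PySem.Dict.empty).getD v [] =
    (PySem.List.pyRange 0 (requests.length : Int) 1).filter
      (fun j => PySem.List.pyGetD (PySem.List.pyGetD requests j []) 0 0 == v) := by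
  rw [show ((PySem.List.pyRange 0 (requests.length : Int) 1).foldl
      (fun d j => d.modify (PySem.List.pyGetD (PySem.List.pyGetD requests j []) 0 0) [] (fun w => w ++ [j]))
      PySem.Dict.empty) =
    (((PySem.List.pyRange 0 (requests.length : Int) 1).map
      (fun j => (PySem.List.pyGetD (PySem.List.pyGetD requests j []) 0 0, j))).foldl
      (fun d p => d.modify p.1 [] (fun w => w ++ [p.2])) PySem.Dict.empty)
    from (List.foldl_map (f := fun j => (PySem.List.pyGetD (PySem.List.pyGetD requests j []) 0 0, j))
      (g := fun d p => d.modify p.1 [] (fun w => w ++ [p.2]))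
      (l := PySem.List.pyRange 0 (requests.length : Int) 1) (init := PySem.Dict.empty)).symm]
  rw [PySem.Dict.getD_foldl_modify_append]
  simp [List.filter_map, Function.comp_def, List.map_map]

-- ===== VERDICT (by name: the statement is the Claim_ definition above) =====
theorem l2graph_spec : Claim_equal_l2graph := by
  intro requests _ _
  unfold Spec_l2graph l2graph l2graph_alt
  rw [pv_outer requests requests.length]
  apply List.map_congr_left
  intro i hi
  rw [pv_starts]
  congr 1
  apply List.filter_congr
  intro j hj
  by_cases h : PySem.List.pyGetD (PySem.List.pyGetD requests i []) 1 0 =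
      PySem.List.pyGetD (PySem.List.pyGetD requests j []) 0 0
  · simp [h]
  · simp [h]
    exact (Ne.symm h)
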